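-- pv_equiv track=rewrite | github.com/Adokr/aoc24 | day9/day9.py | findLeftmostFreeSpace
-- ===== SOURCE A (Python) =====
-- def findLeftmostFreeSpace(disk, size, fileID):
--     freeSpaceID = None
--     freeSpaceSize = 0
--     freeSpaceCount = 0
--     fileCount = 0
--     freeSpaceSeenAlready = False
--     fileSeenAlready = False
--
--     for i in range(len(disk)):
--         if i >= fileID:
--             break
--
--         if disk[i] == '.' and not freeSpaceSeenAlready:
--             freeSpaceCount += 1
--             freeSpaceSeenAlready = True
--             fileSeenAlready = False
--             for j in range(i, len(disk)):
--                 if disk[j] == ".":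
--                     freeSpaceSize += 1
--                 else:
--                     break
--             if freeSpaceSize >= size:
--                 freeSpaceID = i
--                 break
--
--         elif disk[i] != '.' and not fileSeenAlready:
--             fileCount += 1
--             freeSpaceSeenAlready = False
--             fileSeenAlready = True
--         freeSpaceSize = 0
--     return freeSpaceID
-- ===== SOURCE B (Python) =====
-- def findLeftmostFreeSpace(disk, size, fileID):
--     run_start = None
--     for i, c in enumerate(disk):
--         if c == '.':
--             if run_start is None:
--                 run_start = i
--             if run_start < fileID and i - run_start + 1 >= size:
--                 return run_start
--         else:
--             run_start = None
--     return None
-- ===== Notes on version B (the rewrite author's own statement) =====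
-- stated objective: simpler
-- what changed: Replaced A's two-flag state machine with a nested rescanning loop by a single pass that tracks only the current dot-run's start index and returns as soon as the run (started before fileID) reaches the required size.
import Mathlib
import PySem

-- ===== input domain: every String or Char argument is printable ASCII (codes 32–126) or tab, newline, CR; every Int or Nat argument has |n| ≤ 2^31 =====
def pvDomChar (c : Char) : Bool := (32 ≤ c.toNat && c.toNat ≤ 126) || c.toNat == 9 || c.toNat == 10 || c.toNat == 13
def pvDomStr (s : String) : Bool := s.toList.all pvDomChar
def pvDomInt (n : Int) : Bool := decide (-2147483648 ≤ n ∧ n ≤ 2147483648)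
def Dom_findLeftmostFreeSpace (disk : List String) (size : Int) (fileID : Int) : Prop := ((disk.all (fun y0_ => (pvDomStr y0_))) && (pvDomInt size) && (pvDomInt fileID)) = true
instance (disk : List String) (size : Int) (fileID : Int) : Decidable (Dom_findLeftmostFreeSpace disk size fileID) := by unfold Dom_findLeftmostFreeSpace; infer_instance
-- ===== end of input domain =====

-- B is a single pass keeping only the current dot-run's start; A keeps two seen-flags and
-- rescans the whole run at each run start. Objective: simpler (same O(n) cost).

-- ===== PORT A =====
-- inner loop `for j in range(i, len(disk)): if disk[j]=='.': freeSpaceSize += 1 else: break`,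
-- walking the suffix of `disk` from position i (the suffix is passed as a list)
def pvAInner : List String → Int → Int
  | [], acc => acc
  | c :: rest, acc => if c == "." then pvAInner rest (acc + 1) else acc

-- outer loop `for i in range(len(disk))`; the suffix of `disk` from position i is the list
-- argument, i is carried alongside; fsc = freeSpaceCount, flc = fileCount (dead counters kept),
-- freeSeen/fileSeen are the two flags; `break`/assignment of freeSpaceID return directly.
def pvALoop (size fileID : Int) : List String → Int → Int → Int → Bool → Bool → Option Int
  | [], _, _, _, _, _ => none
  | c :: rest, i, fsc, flc, freeSeen, fileSeen =>
    if fileID ≤ i then none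
    else if c == "." && !freeSeen then
      let fss := pvAInner (c :: rest) 0
      if size ≤ fss then some i
      else pvALoop size fileID rest (i + 1) (fsc + 1) flc true false
    else if c != "." && !fileSeen then
      pvALoop size fileID rest (i + 1) fsc (flc + 1) false true
    else
      pvALoop size fileID rest (i + 1) fsc flc freeSeen fileSeen

def findLeftmostFreeSpace (disk : List String) (size : Int) (fileID : Int) : Option Int :=
  pvALoop size fileID disk 0 0 0 false false

-- ===== PORT B =====
-- single pass: runStart is `run_start` (none = not inside a dot run)
def pvBLoop (size fileID : Int) : List String → Int → Option Int → Option Int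
  | [], _, _ => none
  | c :: rest, i, runStart =>
    if c == "." then
      let rs := runStart.getD i
      if rs < fileID && size ≤ i - rs + 1 then some rs
      else pvBLoop size fileID rest (i + 1) (some rs)
    else pvBLoop size fileID rest (i + 1) none

def findLeftmostFreeSpace_alt (disk : List String) (size : Int) (fileID : Int) : Option Int :=
  pvBLoop size fileID disk 0 none

-- ===== PRECONDITION & SPEC =====
def Spec_findLeftmostFreeSpace (disk : List String) (size : Int) (fileID : Int) (out : Option Int) : Prop := out = findLeftmostFreeSpace_alt disk size fileID
instance (disk : List String) (size : Int) (fileID : Int) (out : Option Int) : Decidable (Spec_findLeftmostFreeSpace disk size fileID out) := by unfold Spec_findLeftmostFreeSpace; infer_instance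

-- ===== CLAIM (what is proved, stated in full; the proofs are below) =====
def Claim_equal_findLeftmostFreeSpace : Prop := ∀ (disk : List String) (size : Int) (fileID : Int), Dom_findLeftmostFreeSpace disk size fileID → Spec_findLeftmostFreeSpace disk size fileID (findLeftmostFreeSpace disk size fileID)

-- ===== LEMMAS AND PROOFS =====

-- B returns none once the position has passed fileID with no live earlier run start.
theorem pvB_none (size fileID : Int) :
    ∀ (l : List String) (i : Int) (rsO : Option Int),
      fileID ≤ i → (∀ rs, rsO = some rs → fileID ≤ rs) →
      pvBLoop size fileID l i rsO = none := by
  intro l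
  induction l with
  | nil => intro i rsO _ _; rfl
  | cons c rest ih =>
    intro i rsO hi hrs
    simp only [pvBLoop]
    have hrs' : fileID ≤ rsO.getD i := by
      cases rsO with
      | none => simpa using hi
      | some rs => simpa using hrs rs rfl
    split_ifs with h1 h2
    · exfalso
      simp only [Bool.and_eq_true, decide_eq_true_eq] at h2
      omega
    · exact ih (i + 1) (some (rsO.getD i)) (by omega) (by intro rs h; cases h; exact hrs')
    · exact ih (i + 1) none (by omega) (by intro rs h; cases h)

-- B inside a dot run that will reach the required size: returns the run start.
theorem pvB_run_hit (size fileID : Int) :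
    ∀ (dots : List String) (tail : List String) (i rs : Int),
      (∀ c ∈ dots, c = ".") → rs < fileID → i - rs < size → size ≤ i - rs + dots.length →
      pvBLoop size fileID (dots ++ tail) i (some rs) = some rs := by
  intro dots
  induction dots with
  | nil => intro tail i rs _ _ h1 h2; simp at h2; omega
  | cons c ds ih =>
    intro tail i rs hall hrs h1 h2
    have hceq : c = "." := hall c List.mem_cons_self
    simp only [List.cons_append, pvBLoop, Option.getD_some]
    split_ifs with hc hcond
    · rfl
    · simp only [Bool.and_eq_true, decide_eq_true_eq, not_and] at hcond
      exact ih tail (i + 1) rs (fun x hx => hall x (List.mem_cons_of_mem _ hx)) hrs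
        (by have := hcond hrs; omega) (by simp at h2 ⊢; omega)
    · exact absurd (by simp [hceq]) hc

-- B inside a dot run too short to reach the required size: passes through it.
theorem pvB_run_miss (size fileID : Int) :
    ∀ (dots : List String) (tail : List String) (i rs : Int),
      (∀ c ∈ dots, c = ".") → ¬ size ≤ i - rs + dots.length →
      pvBLoop size fileID (dots ++ tail) i (some rs) =
        pvBLoop size fileID tail (i + dots.length) (some rs) := by
  intro dots
  induction dots with
  | nil => intro tail i rs _ _; simp
  | cons c ds ih =>
    intro tail i rs hall h2
    have hceq : c = "." := hall c List.mem_cons_self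
    simp only [List.cons_append, pvBLoop, Option.getD_some]
    split_ifs with hc hcond
    · exfalso
      simp only [Bool.and_eq_true, decide_eq_true_eq] at hcond
      simp at h2; omega
    · rw [ih tail (i + 1) rs (fun x hx => hall x (List.mem_cons_of_mem _ hx))
        (by simp at h2 ⊢; omega)]
      congr 1
      simp; omega
    · exact absurd (by simp [hceq]) hc

-- A's inner scan counts the dot prefix.
theorem pvAInner_count :
    ∀ (dots : List String) (tail : List String) (acc : Int),
      (∀ c ∈ dots, c = ".") → (tail = [] ∨ ∃ c' t', tail = c' :: t' ∧ c' ≠ ".") →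
      pvAInner (dots ++ tail) acc = acc + dots.length := by
  intro dots
  induction dots with
  | nil =>
    intro tail acc _ htail
    rcases htail with h | ⟨c', t', rfl, hc'⟩
    · simp [h, pvAInner]
    · simp [pvAInner, hc']
  | cons c ds ih =>
    intro tail acc hall htail
    have hceq : c = "." := hall c List.mem_cons_self
    simp only [List.cons_append, pvAInner]
    rw [if_pos (by simp [hceq])]
    rw [ih tail (acc + 1) (fun x hx => hall x (List.mem_cons_of_mem _ hx)) htail]
    simp; omega

-- A mid-run (freeSeen = true) with the whole remaining run before fileID: skips the dots.
theorem pvA_skip_run (size fileID : Int) :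
    ∀ (dots : List String) (tail : List String) (j fsc flc : Int) (fs : Bool),
      (∀ c ∈ dots, c = ".") → j + dots.length ≤ fileID →
      pvALoop size fileID (dots ++ tail) j fsc flc true fs =
        pvALoop size fileID tail (j + dots.length) fsc flc true fs := by
  intro dots
  induction dots with
  | nil => intro tail j fsc flc fs _ _; simp
  | cons c ds ih =>
    intro tail j fsc flc fs hall hle
    have hceq : c = "." := hall c List.mem_cons_self
    simp only [List.cons_append, pvALoop]
    split_ifs with hj hb1 hsize hb3
    · exfalso; simp at hle; omega
    · exfalso; simp at hb1
    · exfalso; simp at hb1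
    · exfalso; simp [hceq] at hb3
    · rw [ih tail (j + 1) fsc flc fs (fun x hx => hall x (List.mem_cons_of_mem _ hx))
        (by simp at hle ⊢; omega)]
      congr 1
      simp; omega

-- A mid-run reaching an index ≥ fileID: breaks, returning none.
theorem pvA_break_run (size fileID : Int) :
    ∀ (dots : List String) (tail : List String) (j fsc flc : Int) (fs : Bool),
      (∀ c ∈ dots, c = ".") → dots ≠ [] → fileID ≤ j + dots.length - 1 →
      pvALoop size fileID (dots ++ tail) j fsc flc true fs = none := by
  intro dots
  induction dots with
  | nil => intro _ _ _ _ _ _ h _; exact absurd rfl h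
  | cons c ds ih =>
    intro tail j fsc flc fs hall _ hbr
    have hceq : c = "." := hall c List.mem_cons_self
    simp only [List.cons_append, pvALoop]
    split_ifs with hj hb1 hsize hb3
    · rfl
    · exfalso; simp at hb1
    · exfalso; simp at hb1
    · exfalso; simp [hceq] at hb3
    · have hds : ds ≠ [] := by
        rintro rfl; simp at hbr; omega
      exact ih tail (j + 1) fsc flc fs (fun x hx => hall x (List.mem_cons_of_mem _ hx)) hds
        (by simp at hbr ⊢; omega)

-- Main alignment: A from a block boundary (freeSeen = false) equals B with no live run.
theorem pvAB_main (size fileID : Int) :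
    ∀ (n : ℕ) (l : List String), l.length ≤ n → ∀ (i fsc flc : Int) (fs : Bool),
      pvALoop size fileID l i fsc flc false fs = pvBLoop size fileID l i none := by
  intro n
  induction n with
  | zero =>
    intro l hl
    have : l = [] := List.eq_nil_of_length_eq_zero (Nat.le_zero.mp hl)
    subst this; intro _ _ _ _; rfl
  | succ n ih =>
    intro l hl i fsc flc fs
    match l with
    | [] => rfl
    | c :: rest =>
      by_cases hi : fileID ≤ i
      · rw [show pvALoop size fileID (c :: rest) i fsc flc false fs = none by
          simp only [pvALoop]; rw [if_pos hi]]
        exact (pvB_none size fileID (c :: rest) i none hi (by intro rs h; cases h)).symm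
      · by_cases hc : c = "."
        · -- decompose the dot run starting at this position
          obtain ⟨dots, tail, hsplit, halld, htl⟩ :
              ∃ dots tail, rest = dots ++ tail ∧ (∀ x ∈ dots, x = ".") ∧
                (tail = [] ∨ ∃ c' t', tail = c' :: t' ∧ c' ≠ ".") := by
            refine ⟨rest.takeWhile (fun s => s == "."), rest.dropWhile (fun s => s == "."),
              (List.takeWhile_append_dropWhile).symm, ?_, ?_⟩
            · intro x hx; simpa using List.mem_takeWhile_imp hx
            · cases h : rest.dropWhile (fun s => s == ".") with
              | nil => exact Or.inl rfl
              | cons c' t' =>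
                refine Or.inr ⟨c', t', rfl, ?_⟩
                have hd := List.head?_dropWhile_not (fun s => s == ".") rest
                rw [h] at hd
                simpa using hd
          have hinner : pvAInner (c :: rest) 0 = 1 + (dots.length : Int) := by
            have heq : (c :: rest) = (c :: dots) ++ tail := by simp [hsplit]
            rw [heq, pvAInner_count (c :: dots) tail 0
              (by intro x hx
                  rcases List.mem_cons.mp hx with h | h
                  · exact h.trans hc
                  · exact halld x h) htl]
            simp; omega
          have hA1 : pvALoop size fileID (c :: rest) i fsc flc false fs =
              (if size ≤ 1 + (dots.length : Int) then some i
               else pvALoop size fileID rest (i + 1) (fsc + 1) flc true false) := by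
            simp only [pvALoop]
            rw [if_neg hi, if_pos (by simp [hc]), hinner]
          by_cases hhit : size ≤ 1 + (dots.length : Int)
          · -- A returns some i; show B does too
            rw [hA1, if_pos hhit]
            simp only [pvBLoop]
            rw [if_pos (by simp [hc] : (c == ".") = true)]
            simp only [Option.getD_none]
            split_ifs with hcond
            · rfl
            · simp only [Bool.and_eq_true, decide_eq_true_eq, not_and] at hcond
              rw [hsplit]
              exact (pvB_run_hit size fileID dots tail (i + 1) i halld (not_le.mp hi)
                (by have := hcond (not_le.mp hi); omega) (by omega)).symm
          · -- run too short: A skips/breaks through the run, B passes through it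
            rw [hA1, if_neg hhit]
            have hB1 : pvBLoop size fileID (c :: rest) i none =
                pvBLoop size fileID tail (i + 1 + dots.length) (some i) := by
              simp only [pvBLoop]
              rw [if_pos (by simp [hc] : (c == ".") = true)]
              simp only [Option.getD_none]
              split_ifs with hcond
              · exfalso
                simp only [Bool.and_eq_true, decide_eq_true_eq] at hcond
                have h0 : (0:Int) ≤ (dots.length : Int) := by positivity
                omega
              · rw [hsplit, pvB_run_miss size fileID dots tail (i + 1) i halld (by omega)]
            rw [hB1, hsplit]
            by_cases hcase : i + 1 + (dots.length : Int) ≤ fileID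
            · -- whole run lies before fileID
              rw [pvA_skip_run size fileID dots tail (i + 1) (fsc + 1) flc false halld hcase]
              rcases htl with h | ⟨c', t', h, hc'⟩
              · subst h; simp [pvALoop, pvBLoop]
              · subst h
                by_cases hi2 : fileID ≤ i + 1 + (dots.length : Int)
                · rw [show pvALoop size fileID (c' :: t') (i + 1 + dots.length)
                      (fsc + 1) flc true false = none by
                    simp only [pvALoop]; rw [if_pos hi2]]
                  rw [show pvBLoop size fileID (c' :: t') (i + 1 + dots.length) (some i) =
                      pvBLoop size fileID t' (i + 1 + dots.length + 1) none by
                    simp only [pvBLoop]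
                    rw [if_neg (by simp [hc'] : ¬ (c' == ".") = true)]]
                  exact (pvB_none size fileID t' (i + 1 + dots.length + 1) none
                    (by omega) (by intro rs h; cases h)).symm
                · simp only [pvALoop, pvBLoop]
                  rw [if_neg hi2, if_neg (by simp : ¬ (c' == "." && !true) = true),
                    if_pos (by simp [hc'] : ((c' != ".") && !false) = true),
                    if_neg (by simp [hc'] : ¬ (c' == ".") = true)]
                  refine ih t' ?_ _ _ _ _
                  have h2 : rest.length = dots.length + (c' :: t').length := by
                    rw [hsplit]; exact List.length_append
                  simp only [List.length_cons] at h2 hl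
                  omega
            · -- run crosses fileID: A breaks mid-run, B finds nothing after the run
              have hdne : dots ≠ [] := by
                rintro rfl; simp at hcase; omega
              rw [pvA_break_run size fileID dots tail (i + 1) (fsc + 1) flc false halld hdne
                (by omega)]
              rcases htl with h | ⟨c', t', h, hc'⟩
              · subst h; simp [pvBLoop]
              · subst h
                simp only [pvBLoop]
                rw [if_neg (by simp [hc'] : ¬ (c' == ".") = true)]
                exact (pvB_none size fileID t' (i + 1 + dots.length + 1) none
                  (by omega) (by intro rs h; cases h)).symm
        · -- non-dot character: both step forward
          simp only [pvALoop, pvBLoop]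
          rw [if_neg hi, if_neg (by simp [hc] : ¬ (c == "." && !false) = true),
            if_neg (by simp [hc] : ¬ (c == ".") = true)]
          by_cases hfs : fs
          · subst hfs
            rw [if_neg (by simp : ¬ ((c != ".") && !true) = true)]
            exact ih rest (by simp at hl; omega) _ _ _ _
          · simp only [Bool.not_eq_true] at hfs; subst hfs
            rw [if_pos (by simp [hc] : ((c != ".") && !false) = true)]
            exact ih rest (by simp at hl; omega) _ _ _ _

-- ===== VERDICT (by name: the statement is the Claim_ definition above) =====
theorem findLeftmostFreeSpace_spec : Claim_equal_findLeftmostFreeSpace := by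
  intro disk size fileID _
  show findLeftmostFreeSpace disk size fileID = findLeftmostFreeSpace_alt disk size fileID
  exact pvAB_main size fileID disk.length disk le_rfl 0 0 0 false
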